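-- pv_equiv track=rewrite | github.com/bitrifttech/chatbot-tutorial | train.py | pack_sequences
-- ===== SOURCE A (Python) =====
-- def pack_sequences(token_lists, seq_len, eos_id):
--     """
--     Concatenate lists of token IDs, split into equal blocks of seq_len.
--     Remainders are dropped (simple & effective).
--     """
--     buffer = []
--     for ids in token_lists:
--         if not ids or ids[-1] != eos_id:
--             ids = ids + [eos_id]
--         buffer.extend(ids)
--         while len(buffer) >= seq_len + 1:
--             x = buffer[:seq_len]
--             y = buffer[1:seq_len+1]
--             yield (x, y)
--             buffer = buffer[seq_len:]
-- ===== SOURCE B (Python) =====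
-- def pack_sequences(token_lists, seq_len, eos_id):
--     # Two-phase: build the full eos-terminated concatenation once,
--     # then index out the complete (x, y) blocks.
--     concat = []
--     for ids in token_lists:
--         concat.extend(ids)
--         if not ids or ids[-1] != eos_id:
--             concat.append(eos_id)
--     n_blocks = (len(concat) - 1) // seq_len
--     for i in range(n_blocks):
--         yield (concat[i * seq_len:(i + 1) * seq_len],
--                concat[i * seq_len + 1:(i + 1) * seq_len + 1])
-- ===== Notes on version B (the rewrite author's own statement) =====
-- stated objective: alternative
-- what changed: Replaced the interleaved buffer-extend-and-slice while-loop with a two-phase pass: first materialize the full eos-terminated concatenation, then compute the block count by integer division and emit each (x,y) pair by direct index slicing.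
-- outside the precondition, e.g. on pack_sequences([], 0, 0): A returns [], B raises ZeroDivisionError; on pack_sequences([], -1, 0): A returns [], B returns [([], [])]
import Mathlib
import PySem

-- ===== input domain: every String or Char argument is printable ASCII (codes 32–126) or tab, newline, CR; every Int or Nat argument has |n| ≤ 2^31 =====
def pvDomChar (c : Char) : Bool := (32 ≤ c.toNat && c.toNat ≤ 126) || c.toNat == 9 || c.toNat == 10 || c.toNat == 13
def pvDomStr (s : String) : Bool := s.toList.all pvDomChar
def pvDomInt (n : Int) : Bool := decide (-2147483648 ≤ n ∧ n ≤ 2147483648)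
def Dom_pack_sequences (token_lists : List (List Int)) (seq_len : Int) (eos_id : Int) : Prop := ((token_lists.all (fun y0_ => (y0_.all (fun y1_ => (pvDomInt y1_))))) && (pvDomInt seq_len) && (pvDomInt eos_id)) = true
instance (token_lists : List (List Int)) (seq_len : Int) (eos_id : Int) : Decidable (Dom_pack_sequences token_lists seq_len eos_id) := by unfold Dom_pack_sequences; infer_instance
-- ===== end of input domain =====

-- B rewrites A's interleaved buffer-extend-and-slice while-loop as a two-phase pass
-- (build the full concatenation, then emit blocks by index); return-value equivalence
-- proved for 1 ≤ seq_len (A is a generator; list() of it is what is ported).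

-- ===== PORT A =====
-- A's inner `while len(buffer) >= seq_len + 1` loop. The `1 ≤ seq_len` conjunct only
-- makes the recursion well-founded: for seq_len ≤ 0 the Python loop never terminates
-- (excluded by Pre_). Slices buffer[:s], buffer[1:s+1], buffer[s:] are exact as
-- take/drop for 1 ≤ seq_len.
def packChop (seq_len : Int) (buf : List Int) : List (List Int × List Int) × List Int :=
  if _h : 1 ≤ seq_len ∧ seq_len + 1 ≤ (buf.length : Int) then
    let x := buf.take seq_len.toNat
    let y := (buf.drop 1).take seq_len.toNat
    let rest := packChop seq_len (buf.drop seq_len.toNat)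
    ((x, y) :: rest.1, rest.2)
  else ([], buf)
termination_by buf.length
decreasing_by simp only [List.length_drop]; omega

def pack_sequences (token_lists : List (List Int)) (seq_len : Int) (eos_id : Int) : List (List Int × List Int) :=
  (token_lists.foldl
    (fun (st : List (List Int × List Int) × List Int) ids =>
      let ids2 := if ids = [] ∨ ids.getLast? ≠ some eos_id then ids ++ [eos_id] else ids
      let buf := st.2 ++ ids2
      let r := packChop seq_len buf
      (st.1 ++ r.1, r.2))
    ([], [])).1

-- ===== PORT B =====
def pack_sequences_alt (token_lists : List (List Int)) (seq_len : Int) (eos_id : Int) : List (List Int × List Int) :=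
  let concat := token_lists.foldl
    (fun (c : List Int) ids =>
      let c2 := c ++ ids
      if ids = [] ∨ ids.getLast? ≠ some eos_id then c2 ++ [eos_id] else c2) []
  let n_blocks := PySem.Int.floordiv ((concat.length : Int) - 1) seq_len
  (PySem.List.pyRange 0 n_blocks 1).map (fun i =>
    (PySem.List.slice concat (some (i * seq_len)) (some ((i + 1) * seq_len)),
     PySem.List.slice concat (some (i * seq_len + 1)) (some ((i + 1) * seq_len + 1))))

-- ===== PRECONDITION & SPEC =====
-- Pre_ excludes seq_len < 1: there A's while-loop never terminates on any input whose
-- concatenation is nonempty, and A returns [] only in the degenerate empty cases, where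
-- B's block-count division raises (seq_len = 0) or yields a spurious empty block.
def Pre_pack_sequences (token_lists : List (List Int)) (seq_len : Int) (eos_id : Int) : Prop :=
  1 ≤ seq_len
instance (token_lists : List (List Int)) (seq_len : Int) (eos_id : Int) : Decidable (Pre_pack_sequences token_lists seq_len eos_id) := by unfold Pre_pack_sequences; infer_instance

def pvWitness_pack_sequences : List (List Int) × Int × Int := ([[1, 2, 0], [3]], 2, 0)

def Spec_pack_sequences (token_lists : List (List Int)) (seq_len : Int) (eos_id : Int) (out : List (List Int × List Int)) : Prop := out = pack_sequences_alt token_lists seq_len eos_id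
instance (token_lists : List (List Int)) (seq_len : Int) (eos_id : Int) (out : List (List Int × List Int)) : Decidable (Spec_pack_sequences token_lists seq_len eos_id out) := by unfold Spec_pack_sequences; infer_instance

-- ===== CLAIM (what is proved, stated in full; the proofs are below) =====
def Claim_equal_pack_sequences : Prop := ∀ (token_lists : List (List Int)) (seq_len : Int) (eos_id : Int), Dom_pack_sequences token_lists seq_len eos_id → Pre_pack_sequences token_lists seq_len eos_id → Spec_pack_sequences token_lists seq_len eos_id (pack_sequences token_lists seq_len eos_id)

-- ===== LEMMAS AND PROOFS =====

def pvNorm (eos_id : Int) (ids : List Int) : List Int :=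
  if ids = [] ∨ ids.getLast? ≠ some eos_id then ids ++ [eos_id] else ids

theorem packChop_short (seq_len : Int) (buf : List Int)
    (h : (buf.length : Int) ≤ seq_len) : packChop seq_len buf = ([], buf) := by
  rw [packChop]
  simp only [dif_neg (by omega : ¬ (1 ≤ seq_len ∧ seq_len + 1 ≤ (buf.length : Int)))]

theorem packChop_cons (seq_len : Int) (buf : List Int)
    (h : 1 ≤ seq_len ∧ seq_len + 1 ≤ (buf.length : Int)) :
    packChop seq_len buf =
      ((buf.take seq_len.toNat, (buf.drop 1).take seq_len.toNat) ::
         (packChop seq_len (buf.drop seq_len.toNat)).1,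
       (packChop seq_len (buf.drop seq_len.toNat)).2) := by
  rw [packChop, dif_pos h]

theorem packChop_rem_le (seq_len : Int) (buf : List Int) (hs : 1 ≤ seq_len) :
    ((packChop seq_len buf).2.length : Int) ≤ seq_len := by
  induction buf using packChop.induct seq_len with
  | case1 buf h ih =>
      rw [packChop_cons seq_len buf h]
      exact ih
  | case2 buf h =>
      rw [packChop, dif_neg h]
      simp only []
      omega

theorem packChop_fix (seq_len : Int) (hs : 1 ≤ seq_len) (buf : List Int) :
    packChop seq_len (packChop seq_len buf).2 = ([], (packChop seq_len buf).2) :=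
  packChop_short _ _ (packChop_rem_le seq_len buf hs)

theorem packChop_append (seq_len : Int) (hs : 1 ≤ seq_len) (ys : List Int) (buf : List Int) :
    packChop seq_len (buf ++ ys) =
      ((packChop seq_len buf).1 ++ (packChop seq_len ((packChop seq_len buf).2 ++ ys)).1,
       (packChop seq_len ((packChop seq_len buf).2 ++ ys)).2) := by
  induction buf using packChop.induct seq_len with
  | case1 buf h ih =>
      have ht1 : 1 ≤ seq_len.toNat := by omega
      have htl : seq_len.toNat + 1 ≤ buf.length := by omega
      rw [packChop_cons seq_len (buf ++ ys)
            ⟨h.1, by simp only [List.length_append]; push_cast; omega⟩]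
      rw [packChop_cons seq_len buf h]
      rw [List.take_append_of_le_length (by omega),
          List.drop_append_of_le_length (by omega : seq_len.toNat ≤ buf.length),
          List.drop_append_of_le_length (by omega : 1 ≤ buf.length),
          List.take_append_of_le_length (by simp only [List.length_drop]; omega),
          ih]
      simp
  | case2 buf h =>
      rw [packChop_short seq_len buf (by omega)]
      simp

theorem packChop_blocks (seq_len : Int) (hs : 1 ≤ seq_len) (C : List Int) :
    (packChop seq_len C).1 =
      (List.range ((C.length - 1) / seq_len.toNat)).map
        (fun i => ((C.drop (i * seq_len.toNat)).take seq_len.toNat,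
                   (C.drop (i * seq_len.toNat + 1)).take seq_len.toNat)) := by
  induction C using packChop.induct seq_len with
  | case1 C h ih =>
      have ht1 : 1 ≤ seq_len.toNat := by omega
      have htl : seq_len.toNat + 1 ≤ C.length := by omega
      rw [packChop_cons seq_len C h, ih]
      have hm : (C.length - 1) / seq_len.toNat
          = ((C.drop seq_len.toNat).length - 1) / seq_len.toNat + 1 := by
        rw [Nat.div_eq_sub_div (by omega) (by omega : seq_len.toNat ≤ C.length - 1)]
        simp only [List.length_drop]
        congr 2
        omega
      rw [hm, List.range_succ_eq_map, List.map_cons, List.map_map]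
      simp only [Nat.zero_mul, List.drop_zero, Nat.zero_add, List.cons.injEq]
      refine ⟨by trivial, ?_⟩
      apply List.map_congr_left
      intro i _
      simp only [Function.comp_apply, List.drop_drop]
      have h1 : seq_len.toNat + i * seq_len.toNat = i.succ * seq_len.toNat := by
        rw [Nat.succ_mul]; ring
      have h2 : seq_len.toNat + (i * seq_len.toNat + 1) = i.succ * seq_len.toNat + 1 := by
        rw [Nat.succ_mul]; ring
      rw [h1, h2]
  | case2 C h =>
      rw [packChop_short seq_len C (by omega)]
      have hz : (C.length - 1) / seq_len.toNat = 0 := Nat.div_eq_of_lt (by omega)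
      simp [hz]

-- step function of A's fold, named for the lemmas
def pvStepA (seq_len eos_id : Int) (st : List (List Int × List Int) × List Int) (ids : List Int) :
    List (List Int × List Int) × List Int :=
  let ids2 := if ids = [] ∨ ids.getLast? ≠ some eos_id then ids ++ [eos_id] else ids
  let buf := st.2 ++ ids2
  let r := packChop seq_len buf
  (st.1 ++ r.1, r.2)

theorem pvFoldA_eq (seq_len eos_id : Int) (hs : 1 ≤ seq_len) :
    ∀ (ts : List (List Int)) (out : List (List Int × List Int)) (buf : List Int),
      packChop seq_len buf = ([], buf) →
      (ts.foldl (pvStepA seq_len eos_id) (out, buf)).1 =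
        out ++ (packChop seq_len (buf ++ (ts.map (pvNorm eos_id)).flatten)).1 := by
  intro ts
  induction ts with
  | nil =>
      intro out buf hb
      simp [hb]
  | cons hd tl ih =>
      intro out buf hb
      simp only [List.foldl_cons]
      have hstep : pvStepA seq_len eos_id (out, buf) hd =
          (out ++ (packChop seq_len (buf ++ pvNorm eos_id hd)).1,
           (packChop seq_len (buf ++ pvNorm eos_id hd)).2) := rfl
      rw [hstep, ih _ _ (packChop_fix seq_len hs (buf ++ pvNorm eos_id hd)),
          List.map_cons, List.flatten_cons, ← List.append_assoc buf,
          packChop_append seq_len hs ((tl.map (pvNorm eos_id)).flatten) (buf ++ pvNorm eos_id hd)]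
      simp

theorem pvConcatB_eq (eos_id : Int) :
    ∀ (ts : List (List Int)) (acc : List Int),
      ts.foldl (fun (c : List Int) ids =>
        let c2 := c ++ ids
        if ids = [] ∨ ids.getLast? ≠ some eos_id then c2 ++ [eos_id] else c2) acc =
      acc ++ (ts.map (pvNorm eos_id)).flatten := by
  intro ts
  induction ts with
  | nil => intro acc; simp
  | cons hd tl ih =>
      intro acc
      simp only [List.foldl_cons, List.map_cons, List.flatten_cons]
      rw [ih]
      unfold pvNorm
      split_ifs <;> simp [List.append_assoc]

-- ===== VERDICT (by name: the statement is the Claim_ definition above) =====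
theorem pack_sequences_spec : Claim_equal_pack_sequences := by
  intro token_lists seq_len eos_id _hdom hpre
  have hs : 1 ≤ seq_len := hpre
  unfold Spec_pack_sequences pack_sequences pack_sequences_alt
  simp only [pvConcatB_eq eos_id token_lists, List.nil_append]
  have hA : (token_lists.foldl
      (fun (st : List (List Int × List Int) × List Int) ids =>
        let ids2 := if ids = [] ∨ ids.getLast? ≠ some eos_id then ids ++ [eos_id] else ids
        let buf := st.2 ++ ids2
        let r := packChop seq_len buf
        (st.1 ++ r.1, r.2)) ([], [])).1
      = (packChop seq_len ((token_lists.map (pvNorm eos_id)).flatten)).1 := by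
    have := pvFoldA_eq seq_len eos_id hs token_lists [] []
      (packChop_short seq_len [] (by simp; omega))
    simpa [pvStepA] using this
  rw [hA, packChop_blocks seq_len hs]
  set C := (token_lists.map (pvNorm eos_id)).flatten with hC
  by_cases hC0 : C = []
  · rw [hC0]
    have h1 : PySem.Int.floordiv (((([] : List Int).length : Nat) : Int) - 1) seq_len = -1 := by
      refine (PySem.Int.floordiv_eq_iff_of_pos (by omega)).mpr ?_
      constructor <;> (simp; try omega)
    rw [h1, PySem.List.pyRange_one_eq_nil (by omega)]
    simp
  · have hL : 1 ≤ C.length := List.length_pos_of_ne_nil hC0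
    have hcast : ((C.length : Int) - 1) = ((C.length - 1 : Nat) : Int) := by push_cast; omega
    have hts : seq_len = ((seq_len.toNat : Nat) : Int) := by omega
    rw [hcast, hts, PySem.Int.floordiv_natCast, PySem.List.pyRange_one]
    simp only [sub_zero, Int.toNat_natCast, List.map_map]
    apply List.map_congr_left
    intro k _
    simp only [Function.comp_apply, zero_add]
    have e1 : (k : Int) * (seq_len.toNat : Int) = ((k * seq_len.toNat : Nat) : Int) := by push_cast; ring
    have e2 : ((k : Int) + 1) * (seq_len.toNat : Int) = ((k * seq_len.toNat + seq_len.toNat : Nat) : Int) := by push_cast; ring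
    have e3 : ((k * seq_len.toNat : Nat) : Int) + 1 = ((k * seq_len.toNat + 1 : Nat) : Int) := by push_cast; ring
    have e4 : ((k * seq_len.toNat + seq_len.toNat : Nat) : Int) + 1 = ((k * seq_len.toNat + seq_len.toNat + 1 : Nat) : Int) := by push_cast; ring
    rw [e1, e2, e3, e4, PySem.List.slice_natCast, PySem.List.slice_natCast]
    have f1 : k * seq_len.toNat + seq_len.toNat - k * seq_len.toNat = seq_len.toNat := by omega
    have f2 : k * seq_len.toNat + seq_len.toNat + 1 - (k * seq_len.toNat + 1) = seq_len.toNat := by omega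
    rw [f1, f2]
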